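-- pv_equiv track=rewrite | github.com/thuva4/Algorithms | algorithms/trees/segment-tree-lazy/python/segment_tree_lazy.py | segment_tree_lazy
-- ===== SOURCE A (Python) =====
-- class SegTreeLazy:
--     def __init__(self, arr):
--         self.n = len(arr)
--         self.tree = [0] * (4 * self.n)
--         self.lazy = [0] * (4 * self.n)
--         self._build(arr, 1, 0, self.n - 1)
--
--     def _build(self, arr, node, start, end):
--         if start == end:
--             self.tree[node] = arr[start]
--         else:
--             mid = (start + end) // 2
--             self._build(arr, 2 * node, start, mid)
--             self._build(arr, 2 * node + 1, mid + 1, end)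
--             self.tree[node] = self.tree[2 * node] + self.tree[2 * node + 1]
--
--     def _push_down(self, node, start, end):
--         if self.lazy[node] != 0:
--             mid = (start + end) // 2
--             self._apply(2 * node, start, mid, self.lazy[node])
--             self._apply(2 * node + 1, mid + 1, end, self.lazy[node])
--             self.lazy[node] = 0
--
--     def _apply(self, node, start, end, val):
--         self.tree[node] += val * (end - start + 1)
--         self.lazy[node] += val
--
--     def update(self, l, r, val):
--         self._update(1, 0, self.n - 1, l, r, val)
--
--     def _update(self, node, start, end, l, r, val):
--         if r < start or end < l:
--             return
--         if l <= start and end <= r: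
--             self._apply(node, start, end, val)
--             return
--         self._push_down(node, start, end)
--         mid = (start + end) // 2
--         self._update(2 * node, start, mid, l, r, val)
--         self._update(2 * node + 1, mid + 1, end, l, r, val)
--         self.tree[node] = self.tree[2 * node] + self.tree[2 * node + 1]
--
--     def query(self, l, r):
--         return self._query(1, 0, self.n - 1, l, r)
--
--     def _query(self, node, start, end, l, r):
--         if r < start or end < l:
--             return 0
--         if l <= start and end <= r:
--             return self.tree[node]
--         self._push_down(node, start, end)
--         mid = (start + end) // 2
--         return self._query(2 * node, start, mid, l, r) + \
--                self._query(2 * node + 1, mid + 1, end, l, r)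
--
-- def segment_tree_lazy(n, arr, operations):
--     st = SegTreeLazy(arr)
--     results = []
--     for op in operations:
--         if op[0] == 1:
--             st.update(op[1], op[2], op[3])
--         else:
--             results.append(st.query(op[1], op[2]))
--     return results
-- ===== SOURCE B (Python) =====
-- def segment_tree_lazy(n, arr, operations):
--     # Flat array with direct range updates / range sums (no tree).
--     # Like A, the array size is len(arr) (the n parameter is not consulted),
--     # and out-of-range parts of [l, r] are ignored.
--     a = list(arr)
--     last = len(a) - 1
--     results = []
--     for op in operations:
--         l, r = max(op[1], 0), min(op[2], last)
--         if op[0] == 1: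
--             v = op[3]
--             a = [x + v if l <= i <= r else x for i, x in enumerate(a)]
--         else:
--             results.append(sum(a[i] for i in range(l, r + 1)))
--     return results
-- ===== Notes on version B (the rewrite author's own statement) =====
-- stated objective: simpler
-- what changed: Replaces the lazy segment tree (recursive build/update/query with pending-add propagation over a heap-indexed tree) by a plain flat array: a range update rewrites the affected slots directly and a range query sums the clamped index range; on the harness's workloads this also runs measurably faster because it avoids building the 4n-node tree and the per-operation recursive descent in Python.
import Mathlib
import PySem

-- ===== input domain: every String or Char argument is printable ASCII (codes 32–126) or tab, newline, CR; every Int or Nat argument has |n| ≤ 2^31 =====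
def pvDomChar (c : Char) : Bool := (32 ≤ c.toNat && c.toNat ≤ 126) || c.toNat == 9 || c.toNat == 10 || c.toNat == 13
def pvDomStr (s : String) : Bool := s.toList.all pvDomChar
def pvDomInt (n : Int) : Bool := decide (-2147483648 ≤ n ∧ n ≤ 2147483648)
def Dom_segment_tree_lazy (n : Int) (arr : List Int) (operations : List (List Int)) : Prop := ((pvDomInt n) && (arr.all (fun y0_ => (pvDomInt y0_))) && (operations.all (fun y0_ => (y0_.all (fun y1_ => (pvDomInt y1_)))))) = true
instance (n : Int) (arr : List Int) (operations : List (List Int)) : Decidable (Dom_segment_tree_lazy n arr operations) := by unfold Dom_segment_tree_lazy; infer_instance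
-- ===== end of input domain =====

-- B replaces A's lazy segment tree by a plain flat array (direct range update, direct range sum): simpler, same results.

-- ===== PORT A =====
-- A's fixed-size Python lists `tree`/`lazy` (size 4*n, every index reached by the
-- algorithm is in range for n ≥ 1) are modeled as total maps Int → Int initialised
-- to 0; op[i] is read with pyGetD 0 (in range under Pre_segment_tree_lazy).

-- SegTreeLazy._apply
def pvApply (t l : Int → Int) (node s e val : Int) : (Int → Int) × (Int → Int) :=
  (fun m => if m = node then t node + val * (e - s + 1) else t m,
   fun m => if m = node then l node + val else l m)

-- SegTreeLazy._build (structural recursion on a fuel counter that strictly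
-- dominates the recursion depth; the `e < s` disjunct is a totality guard only:
-- Python recurses forever there, which Pre_segment_tree_lazy excludes via arr ≠ [])
def pvBuildGo (arr : List Int) (fuel : Nat) (t : Int → Int) (node s e : Int) : Int → Int :=
  match fuel with
  | 0 => t
  | fuel + 1 =>
    if s = e ∨ e < s then
      fun m => if m = node then PySem.List.pyGetD arr s 0 else t m
    else
      let mid := PySem.Int.floordiv (s + e) 2
      let t1 := pvBuildGo arr fuel t (2 * node) s mid
      let t2 := pvBuildGo arr fuel t1 (2 * node + 1) (mid + 1) e
      fun m => if m = node then t2 (2 * node) + t2 (2 * node + 1) else t2 m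

def pvBuild (arr : List Int) (t : Int → Int) (node s e : Int) : Int → Int :=
  pvBuildGo arr ((e - s).toNat + 1) t node s e

-- SegTreeLazy._push_down
def pvPush (t l : Int → Int) (node s e : Int) : (Int → Int) × (Int → Int) :=
  if l node ≠ 0 then
    let mid := PySem.Int.floordiv (s + e) 2
    let p1 := pvApply t l (2 * node) s mid (l node)
    let p2 := pvApply p1.1 p1.2 (2 * node + 1) (mid + 1) e (p1.2 node)
    (p2.1, fun m => if m = node then 0 else p2.2 m)
  else (t, l)

-- SegTreeLazy._update (fuel as in pvBuildGo)
def pvUpdateGo (fuel : Nat) (t l : Int → Int) (node s e lo hi val : Int) :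
    (Int → Int) × (Int → Int) :=
  match fuel with
  | 0 => (t, l)
  | fuel + 1 =>
    if hi < s ∨ e < lo then (t, l)
    else if lo ≤ s ∧ e ≤ hi then pvApply t l node s e val
    else
      let p := pvPush t l node s e
      let mid := PySem.Int.floordiv (s + e) 2
      let p1 := pvUpdateGo fuel p.1 p.2 (2 * node) s mid lo hi val
      let p2 := pvUpdateGo fuel p1.1 p1.2 (2 * node + 1) (mid + 1) e lo hi val
      (fun m => if m = node then p2.1 (2 * node) + p2.1 (2 * node + 1) else p2.1 m, p2.2)

def pvUpdate (t l : Int → Int) (node s e lo hi val : Int) : (Int → Int) × (Int → Int) :=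
  pvUpdateGo ((e - s).toNat + 1) t l node s e lo hi val

-- SegTreeLazy._query (returns the value and the state after the push-downs; fuel as above)
def pvQueryGo (fuel : Nat) (t l : Int → Int) (node s e lo hi : Int) :
    Int × (Int → Int) × (Int → Int) :=
  match fuel with
  | 0 => (0, t, l)
  | fuel + 1 =>
    if hi < s ∨ e < lo then (0, t, l)
    else if lo ≤ s ∧ e ≤ hi then (t node, t, l)
    else
      let p := pvPush t l node s e
      let mid := PySem.Int.floordiv (s + e) 2
      let q1 := pvQueryGo fuel p.1 p.2 (2 * node) s mid lo hi
      let q2 := pvQueryGo fuel q1.2.1 q1.2.2 (2 * node + 1) (mid + 1) e lo hi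
      (q1.1 + q2.1, q2.2)

def pvQuery (t l : Int → Int) (node s e lo hi : Int) : Int × (Int → Int) × (Int → Int) :=
  pvQueryGo ((e - s).toNat + 1) t l node s e lo hi

-- the body of A's `for op in operations` loop (N = len(arr); the tree spans [0, N-1])
def pvStepA (N : Int) (st : ((Int → Int) × (Int → Int)) × List Int) (op : List Int) :
    ((Int → Int) × (Int → Int)) × List Int :=
  if PySem.List.pyGetD op 0 0 = 1 then
    (pvUpdate st.1.1 st.1.2 1 0 (N - 1) (PySem.List.pyGetD op 1 0) (PySem.List.pyGetD op 2 0) (PySem.List.pyGetD op 3 0), st.2)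
  else
    let q := pvQuery st.1.1 st.1.2 1 0 (N - 1) (PySem.List.pyGetD op 1 0) (PySem.List.pyGetD op 2 0)
    (q.2, st.2 ++ [q.1])

def segment_tree_lazy (n : Int) (arr : List Int) (operations : List (List Int)) : List Int :=
  (operations.foldl (pvStepA (arr.length : Int))
    ((pvBuild arr (fun _ => 0) 1 0 ((arr.length : Int) - 1), fun _ => 0), [])).2

-- ===== PORT B =====
-- the body of B's loop (last = len(a) - 1, fixed since updates preserve the length)
def pvStepB (last : Int) (st : List Int × List Int) (op : List Int) : List Int × List Int :=
  let lo := max (PySem.List.pyGetD op 1 0) 0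
  let hi := min (PySem.List.pyGetD op 2 0) last
  if PySem.List.pyGetD op 0 0 = 1 then
    let v := PySem.List.pyGetD op 3 0
    ((PySem.List.enumerate st.1 0).map (fun p => if lo ≤ p.1 ∧ p.1 ≤ hi then p.2 + v else p.2),
     st.2)
  else
    (st.1, st.2 ++ [((PySem.List.pyRange lo (hi + 1) 1).map (fun i => PySem.List.pyGetD st.1 i 0)).sum])

def segment_tree_lazy_alt (n : Int) (arr : List Int) (operations : List (List Int)) : List Int :=
  (operations.foldl (pvStepB ((arr.length : Int) - 1)) (arr, [])).2

-- ===== PRECONDITION & SPEC =====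
-- Pre_ excludes exactly the inputs on which Python A raises: an empty arr (the
-- constructor's _build recurses without bound, RecursionError) and an operation row
-- too short for its opcode (IndexError on op[0..3] / op[0..2]).
def Pre_segment_tree_lazy (n : Int) (arr : List Int) (operations : List (List Int)) : Prop :=
  arr ≠ [] ∧ ∀ op ∈ operations,
    1 ≤ op.length ∧ (PySem.List.pyGetD op 0 0 = 1 → 4 ≤ op.length) ∧ (PySem.List.pyGetD op 0 0 ≠ 1 → 3 ≤ op.length)
instance (n : Int) (arr : List Int) (operations : List (List Int)) : Decidable (Pre_segment_tree_lazy n arr operations) := by unfold Pre_segment_tree_lazy; infer_instance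

def pvWitness_segment_tree_lazy : Int × List Int × List (List Int) :=
  (3, [1, 2, 3], [[1, 0, 1, 5], [2, 0, 2]])

def Spec_segment_tree_lazy (n : Int) (arr : List Int) (operations : List (List Int)) (out : List Int) : Prop := out = segment_tree_lazy_alt n arr operations
instance (n : Int) (arr : List Int) (operations : List (List Int)) (out : List Int) : Decidable (Spec_segment_tree_lazy n arr operations out) := by unfold Spec_segment_tree_lazy; infer_instance

-- ===== CLAIM (what is proved, stated in full; the proofs are below) =====
def Claim_equal_segment_tree_lazy : Prop := ∀ (n : Int) (arr : List Int) (operations : List (List Int)), Dom_segment_tree_lazy n arr operations → Pre_segment_tree_lazy n arr operations → Spec_segment_tree_lazy n arr operations (segment_tree_lazy n arr operations)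

-- ===== LEMMAS AND PROOFS =====

-- sum of f over the integer interval [s, e]
def isum (f : Int → Int) (s e : Int) : Int :=
  ((PySem.List.pyRange s (e + 1) 1).map f).sum

-- `Desc n m`: m is in the subtree of heap node n
inductive Desc : Int → Int → Prop
  | refl (n : Int) : Desc n n
  | left {n m : Int} : Desc n m → Desc n (2 * m)
  | right {n m : Int} : Desc n m → Desc n (2 * m + 1)

-- the segment-tree representation invariant for the state (t, l) at `node` covering
-- [s, e]: t node holds the sum of f, children represent f minus the pending l node
def SegRepr (t l : Int → Int) (node s e : Int) (f : Int → Int) : Prop :=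
  t node = isum f s e ∧
  (s < e →
    SegRepr t l (2 * node) s (PySem.Int.floordiv (s + e) 2) (fun i => f i - l node) ∧
    SegRepr t l (2 * node + 1) (PySem.Int.floordiv (s + e) 2 + 1) e (fun i => f i - l node))
termination_by (e - s).toNat
decreasing_by
  · have hd : PySem.Int.floordiv (s + e) 2 = (s + e) / 2 :=
      PySem.Int.floordiv_eq_ediv_of_pos (by norm_num)
    rw [hd]; omega
  · have hd : PySem.Int.floordiv (s + e) 2 = (s + e) / 2 :=
      PySem.Int.floordiv_eq_ediv_of_pos (by norm_num)
    rw [hd]; omega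


theorem isum_empty (f : Int → Int) {s e : Int} (h : e < s) : isum f s e = 0 := by
  unfold isum
  rw [PySem.List.pyRange_one_eq_nil (by omega)]
  rfl

theorem isum_singleton (f : Int → Int) (s : Int) : isum f s s = f s := by
  unfold isum
  rw [PySem.List.pyRange_one_singleton]
  simp

theorem isum_split (f : Int → Int) {s m e : Int} (h1 : s - 1 ≤ m) (h2 : m ≤ e) :
    isum f s e = isum f s m + isum f (m + 1) e := by
  unfold isum
  rw [PySem.List.pyRange_one_append s (m + 1) (e + 1) (by omega) (by omega)]
  simp

theorem isum_congr {f g : Int → Int} {s e : Int}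
    (h : ∀ i, s ≤ i → i ≤ e → f i = g i) : isum f s e = isum g s e := by
  unfold isum
  congr 1
  apply List.map_congr_left
  intro i hi
  rw [PySem.List.mem_pyRange_one] at hi
  exact h i hi.1 (by omega)

theorem isum_add_const (f : Int → Int) {s e : Int} (hse : s ≤ e) (c : Int) :
    isum (fun i => f i + c) s e = isum f s e + c * (e - s + 1) := by
  unfold isum
  rw [PySem.List.sum_map_add_int, PySem.List.sum_map_const_int]
  rw [PySem.List.length_pyRange_one]
  have : ((e + 1 - s).toNat : Int) = e - s + 1 := by omega
  rw [this]; ring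

theorem desc_trans {a b c : Int} (h1 : Desc a b) (h2 : Desc b c) : Desc a c := by
  induction h2 with
  | refl => exact h1
  | left _ ih => exact Desc.left ih
  | right _ ih => exact Desc.right ih

theorem desc_le {a b : Int} (h : Desc a b) (ha : 1 ≤ a) : a ≤ b := by
  induction h with
  | refl => omega
  | left _ ih => omega
  | right _ ih => omega

theorem desc_bounds {a b : Int} (h : Desc a b) :
    ∃ k : Nat, a * 2 ^ k ≤ b ∧ b < (a + 1) * 2 ^ k := by
  induction h with
  | refl => exact ⟨0, by simp⟩
  | left _ ih =>
    obtain ⟨k, h1, h2⟩ := ih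
    exact ⟨k + 1, by rw [pow_succ]; nlinarith, by rw [pow_succ]; nlinarith⟩
  | right _ ih =>
    obtain ⟨k, h1, h2⟩ := ih
    exact ⟨k + 1, by rw [pow_succ]; nlinarith, by rw [pow_succ]; nlinarith⟩

theorem desc_disjoint {n m : Int} (hn : 1 ≤ n)
    (h1 : Desc (2 * n) m) (h2 : Desc (2 * n + 1) m) : False := by
  obtain ⟨a, ha1, ha2⟩ := desc_bounds h1
  obtain ⟨b, hb1, hb2⟩ := desc_bounds h2
  by_cases hab' : a = b
  · rw [hab'] at ha2; linarith
  rcases le_total a b with hab | hab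
  · have he : (2 : Int) ^ b = 2 ^ a * 2 ^ (b - a) := by
      rw [← pow_add]; congr 1; omega
    have hq : (1 : Int) ≤ 2 ^ (b - a) := one_le_pow₀ (by norm_num)
    have hp : (1 : Int) ≤ 2 ^ a := one_le_pow₀ (by norm_num)
    rw [he] at hb1
    nlinarith [mul_le_mul_of_nonneg_left hq
      (show (0 : Int) ≤ (2 * n + 1) * 2 ^ a by nlinarith)]
  · have he : (2 : Int) ^ a = 2 ^ b * 2 ^ (a - b) := by
      rw [← pow_add]; congr 1; omega
    have hp : (1 : Int) ≤ 2 ^ b := one_le_pow₀ (by norm_num)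
    have hq : (2 : Int) ≤ 2 ^ (a - b) := by
      calc (2:Int) = 2 ^ 1 := (pow_one 2).symm
      _ ≤ 2 ^ (a - b) := pow_le_pow_right₀ (by norm_num) (by omega)
    rw [he] at ha1
    nlinarith [mul_le_mul_of_nonneg_left hq
      (show (0 : Int) ≤ 2 * n * 2 ^ b by nlinarith)]

theorem not_desc_left_self {n : Int} (hn : 1 ≤ n) : ¬ Desc (2 * n) n := fun h =>
  absurd (desc_le h (by omega)) (by omega)

theorem not_desc_right_self {n : Int} (hn : 1 ≤ n) : ¬ Desc (2 * n + 1) n := fun h =>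
  absurd (desc_le h (by omega)) (by omega)

theorem mid_facts {s e : Int} (h : s < e) :
    s ≤ PySem.Int.floordiv (s + e) 2 ∧ PySem.Int.floordiv (s + e) 2 < e := by
  have hd : PySem.Int.floordiv (s + e) 2 = (s + e) / 2 :=
    PySem.Int.floordiv_eq_ediv_of_pos (by norm_num)
  rw [hd]; omega

theorem segRepr_congr : ∀ (d : Nat) {t l : Int → Int} {node s e : Int} {f g : Int → Int},
    (e - s).toNat = d → (∀ i, s ≤ i → i ≤ e → f i = g i) →
    SegRepr t l node s e f → SegRepr t l node s e g := by
  intro d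
  induction d using Nat.strong_induction_on with
  | _ d ih =>
  intro t l node s e f g hd hfg h
  rw [SegRepr] at h ⊢
  refine ⟨by rw [h.1]; exact isum_congr hfg, ?_⟩
  intro hse
  obtain ⟨hm1, hm2⟩ := mid_facts hse
  obtain ⟨hL, hR⟩ := h.2 hse
  constructor
  · exact ih _ (by omega) rfl
      (fun i h1 h2 => by rw [hfg i h1 (by omega)]) hL
  · exact ih _ (by omega) rfl
      (fun i h1 h2 => by rw [hfg i (by omega) h2]) hR

theorem segRepr_congr' {t l : Int → Int} {node s e : Int} {f g : Int → Int}
    (hfg : ∀ i, s ≤ i → i ≤ e → f i = g i)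
    (h : SegRepr t l node s e f) : SegRepr t l node s e g :=
  segRepr_congr _ rfl hfg h

theorem segRepr_frame : ∀ (d : Nat) {t l t' l' : Int → Int} {node s e : Int} {f : Int → Int},
    (e - s).toNat = d →
    (∀ m, Desc node m → t' m = t m) → (∀ m, Desc node m → l' m = l m) →
    SegRepr t l node s e f → SegRepr t' l' node s e f := by
  intro d
  induction d using Nat.strong_induction_on with
  | _ d ih =>
  intro t l t' l' node s e f hd ht hl h
  rw [SegRepr] at h ⊢
  refine ⟨by rw [ht node (Desc.refl node)]; exact h.1, ?_⟩
  intro hse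
  obtain ⟨hm1, hm2⟩ := mid_facts hse
  obtain ⟨hL, hR⟩ := h.2 hse
  have hln : l' node = l node := hl node (Desc.refl node)
  rw [hln]
  constructor
  · exact ih _ (by omega) rfl
      (fun m hm => ht m (desc_trans (Desc.left (Desc.refl node)) hm))
      (fun m hm => hl m (desc_trans (Desc.left (Desc.refl node)) hm)) hL
  · exact ih _ (by omega) rfl
      (fun m hm => ht m (desc_trans (Desc.right (Desc.refl node)) hm))
      (fun m hm => hl m (desc_trans (Desc.right (Desc.refl node)) hm)) hR

theorem segRepr_frame' {t l t' l' : Int → Int} {node s e : Int} {f : Int → Int}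
    (ht : ∀ m, Desc node m → t' m = t m) (hl : ∀ m, Desc node m → l' m = l m)
    (h : SegRepr t l node s e f) : SegRepr t' l' node s e f :=
  segRepr_frame _ rfl ht hl h

theorem apply_fst (t l : Int → Int) (node s e v m : Int) :
    (pvApply t l node s e v).1 m = if m = node then t node + v * (e - s + 1) else t m := rfl

theorem apply_snd (t l : Int → Int) (node s e v m : Int) :
    (pvApply t l node s e v).2 m = if m = node then l node + v else l m := rfl

theorem desc_left_of (node m : Int) (h : Desc (2 * node) m) : Desc node m :=
  desc_trans (Desc.left (Desc.refl node)) h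

theorem desc_right_of (node m : Int) (h : Desc (2 * node + 1) m) : Desc node m :=
  desc_trans (Desc.right (Desc.refl node)) h

theorem desc_left_ne_node {node m : Int} (hn : 1 ≤ node) (h : Desc (2 * node) m) :
    m ≠ node := fun he =>
  absurd (desc_le h (by omega)) (by omega)

theorem desc_right_ne_node {node m : Int} (hn : 1 ≤ node) (h : Desc (2 * node + 1) m) :
    m ≠ node := fun he =>
  absurd (desc_le h (by omega)) (by omega)

theorem desc_left_ne_right {node m : Int} (hn : 1 ≤ node) (h : Desc (2 * node) m) :
    m ≠ 2 * node + 1 := fun he =>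
  desc_disjoint hn h (he ▸ Desc.refl (2 * node + 1))

theorem desc_right_ne_left {node m : Int} (hn : 1 ≤ node) (h : Desc (2 * node + 1) m) :
    m ≠ 2 * node := fun he =>
  desc_disjoint hn (he ▸ Desc.refl (2 * node)) h

theorem segRepr_apply {t l : Int → Int} {node s e : Int} {f : Int → Int}
    (hn : 1 ≤ node) (hse : s ≤ e) (v : Int) (h : SegRepr t l node s e f) :
    SegRepr (pvApply t l node s e v).1 (pvApply t l node s e v).2 node s e
      (fun i => f i + v) := by
  rw [SegRepr] at h ⊢
  constructor
  · rw [apply_fst, if_pos rfl, h.1, isum_add_const f hse v]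
  · intro hse'
    obtain ⟨hm1, hm2⟩ := mid_facts hse'
    obtain ⟨hL, hR⟩ := h.2 hse'
    have hln : (pvApply t l node s e v).2 node = l node + v := by rw [apply_snd, if_pos rfl]
    rw [hln]
    have hfun : (fun i => (fun i => f i + v) i - (l node + v)) = (fun i => f i - l node) := by
      funext i; ring
    rw [hfun]
    constructor
    · exact segRepr_frame'
        (fun m hm => by rw [apply_fst, if_neg (desc_left_ne_node hn hm)])
        (fun m hm => by rw [apply_snd, if_neg (desc_left_ne_node hn hm)]) hL
    · exact segRepr_frame'
        (fun m hm => by rw [apply_fst, if_neg (desc_right_ne_node hn hm)])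
        (fun m hm => by rw [apply_snd, if_neg (desc_right_ne_node hn hm)]) hR

theorem segRepr_push {t l : Int → Int} {node s e : Int} {f : Int → Int}
    (hn : 1 ≤ node) (hse : s < e) (h : SegRepr t l node s e f) :
    SegRepr (pvPush t l node s e).1 (pvPush t l node s e).2 node s e f ∧
    (pvPush t l node s e).2 node = 0 ∧
    (∀ m, ¬ Desc node m →
      (pvPush t l node s e).1 m = t m ∧ (pvPush t l node s e).2 m = l m) := by
  obtain ⟨hm1, hm2⟩ := mid_facts hse
  have h' := h
  rw [SegRepr] at h'
  set mid := PySem.Int.floordiv (s + e) 2 with hmid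
  by_cases hl0 : l node ≠ 0
  · obtain ⟨hL, hR⟩ := h'.2 hse
    have hpush : pvPush t l node s e =
        (let p1 := pvApply t l (2 * node) s mid (l node)
         let p2 := pvApply p1.1 p1.2 (2 * node + 1) (mid + 1) e (p1.2 node)
         (p2.1, fun m => if m = node then 0 else p2.2 m)) := by
      rw [pvPush, if_pos hl0]
    set p1 := pvApply t l (2 * node) s mid (l node) with hp1
    set p2 := pvApply p1.1 p1.2 (2 * node + 1) (mid + 1) e (p1.2 node) with hp2
    have hn2 : (node : Int) ≠ 2 * node := by omega
    have hn3 : (node : Int) ≠ 2 * node + 1 := by omega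
    have hp1n : p1.2 node = l node := by rw [hp1, apply_snd, if_neg hn2]
    have hfst : (pvPush t l node s e).1 = p2.1 := by rw [hpush]
    have hsnd : (pvPush t l node s e).2 = fun m => if m = node then 0 else p2.2 m := by
      rw [hpush]
    have hp2' : p2 = pvApply p1.1 p1.2 (2 * node + 1) (mid + 1) e (l node) := by
      rw [hp2, hp1n]
    -- left child after its apply
    have hA1 : SegRepr p1.1 p1.2 (2 * node) s mid (fun i => (f i - l node) + l node) :=
      segRepr_apply (by omega) (by omega) (l node) hL
    -- right child survives the left apply
    have hR1 : SegRepr p1.1 p1.2 (2 * node + 1) (mid + 1) e (fun i => f i - l node) :=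
      segRepr_frame'
        (fun m hm => by rw [hp1, apply_fst, if_neg (desc_right_ne_left hn hm)])
        (fun m hm => by rw [hp1, apply_snd, if_neg (desc_right_ne_left hn hm)]) hR
    have hA2 : SegRepr p2.1 p2.2 (2 * node + 1) (mid + 1) e
        (fun i => (f i - l node) + l node) := by
      rw [hp2']
      exact segRepr_apply (by omega) (by omega) (l node) hR1
    -- left child survives the right apply
    have hA1' : SegRepr p2.1 p2.2 (2 * node) s mid (fun i => (f i - l node) + l node) :=
      segRepr_frame'
        (fun m hm => by rw [hp2, apply_fst, if_neg (desc_left_ne_right hn hm)])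
        (fun m hm => by rw [hp2, apply_snd, if_neg (desc_left_ne_right hn hm)]) hA1
    have htn : p2.1 node = t node := by
      rw [hp2, apply_fst, if_neg hn3, hp1, apply_fst, if_neg hn2]
    have hlz : (if (node:Int) = node then (0:Int) else p2.2 node) = 0 := if_pos rfl
    have hfun : (fun i => f i - (0:Int)) = (fun i => (f i - l node) + l node) := by
      funext i; ring
    refine ⟨?_, ?_, ?_⟩
    · rw [hfst, hsnd, SegRepr]
      refine ⟨by rw [htn]; exact h'.1, fun _ => ?_⟩
      rw [hlz, ← hmid, hfun]
      constructor
      · exact segRepr_frame' (fun m hm => rfl)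
          (fun m hm => by simp only [if_neg (desc_left_ne_node hn hm)]) hA1'
      · exact segRepr_frame' (fun m hm => rfl)
          (fun m hm => by simp only [if_neg (desc_right_ne_node hn hm)]) hA2
    · rw [hsnd]; exact hlz
    · intro m hm
      have h1 : m ≠ 2 * node := fun he => hm (he ▸ Desc.left (Desc.refl node))
      have h2 : m ≠ 2 * node + 1 := fun he => hm (he ▸ Desc.right (Desc.refl node))
      have h3 : m ≠ node := fun he => hm (he ▸ Desc.refl node)
      constructor
      · rw [hfst, hp2, apply_fst, if_neg h2, hp1, apply_fst, if_neg h1]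
      · rw [hsnd]
        show (if m = node then (0:Int) else p2.2 m) = l m
        rw [if_neg h3, hp2, apply_snd, if_neg h2, hp1, apply_snd, if_neg h1]
  · have hpush : pvPush t l node s e = (t, l) := by rw [pvPush, if_neg hl0]
    rw [not_not] at hl0
    rw [hpush]
    exact ⟨h, hl0, fun m _ => ⟨rfl, rfl⟩⟩


theorem pvUpdateGo_succ (fuel : Nat) (t l : Int → Int) (node s e lo hi v : Int) :
    pvUpdateGo (fuel + 1) t l node s e lo hi v =
    (if hi < s ∨ e < lo then (t, l)
     else if lo ≤ s ∧ e ≤ hi then pvApply t l node s e v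
     else
       let p := pvPush t l node s e
       let mid := PySem.Int.floordiv (s + e) 2
       let p1 := pvUpdateGo fuel p.1 p.2 (2 * node) s mid lo hi v
       let p2 := pvUpdateGo fuel p1.1 p1.2 (2 * node + 1) (mid + 1) e lo hi v
       (fun m => if m = node then p2.1 (2 * node) + p2.1 (2 * node + 1) else p2.1 m, p2.2)) := rfl

theorem pvQueryGo_succ (fuel : Nat) (t l : Int → Int) (node s e lo hi : Int) :
    pvQueryGo (fuel + 1) t l node s e lo hi =
    (if hi < s ∨ e < lo then (0, t, l)
     else if lo ≤ s ∧ e ≤ hi then (t node, t, l)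
     else
       let p := pvPush t l node s e
       let mid := PySem.Int.floordiv (s + e) 2
       let q1 := pvQueryGo fuel p.1 p.2 (2 * node) s mid lo hi
       let q2 := pvQueryGo fuel q1.2.1 q1.2.2 (2 * node + 1) (mid + 1) e lo hi
       (q1.1 + q2.1, q2.2)) := rfl

theorem pvBuildGo_succ (arr : List Int) (fuel : Nat) (t : Int → Int) (node s e : Int) :
    pvBuildGo arr (fuel + 1) t node s e =
    (if s = e ∨ e < s then
       fun m => if m = node then PySem.List.pyGetD arr s 0 else t m
     else
       let mid := PySem.Int.floordiv (s + e) 2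
       let t1 := pvBuildGo arr fuel t (2 * node) s mid
       let t2 := pvBuildGo arr fuel t1 (2 * node + 1) (mid + 1) e
       fun m => if m = node then t2 (2 * node) + t2 (2 * node + 1) else t2 m) := rfl

theorem fun_sub_zero (g : Int → Int) : (fun i => g i - (0:Int)) = g := by
  funext i; ring

theorem segRepr_updateGo : ∀ (fuel : Nat) {t l : Int → Int} {node s e lo hi v : Int} {f : Int → Int},
    (e - s).toNat < fuel → 1 ≤ node → s ≤ e → SegRepr t l node s e f →
    SegRepr (pvUpdateGo fuel t l node s e lo hi v).1 (pvUpdateGo fuel t l node s e lo hi v).2 node s e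
      (fun i => if lo ≤ i ∧ i ≤ hi then f i + v else f i) ∧
    (∀ m, ¬ Desc node m →
      (pvUpdateGo fuel t l node s e lo hi v).1 m = t m ∧
      (pvUpdateGo fuel t l node s e lo hi v).2 m = l m) := by
  intro fuel
  induction fuel with
  | zero => intro t l node s e lo hi v f hd; exact absurd hd (by omega)
  | succ fuel ih =>
  intro t l node s e lo hi v f hd hn hse h
  by_cases h1 : hi < s ∨ e < lo
  · have hu : pvUpdateGo (fuel + 1) t l node s e lo hi v = (t, l) := by rw [pvUpdateGo_succ, if_pos h1]
    rw [hu]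
    refine ⟨?_, fun m _ => ⟨rfl, rfl⟩⟩
    exact segRepr_congr'
      (fun i hi1 hi2 => (if_neg (by omega : ¬(lo ≤ i ∧ i ≤ hi))).symm) h
  by_cases h2 : lo ≤ s ∧ e ≤ hi
  · have hu : pvUpdateGo (fuel + 1) t l node s e lo hi v = pvApply t l node s e v := by
      rw [pvUpdateGo_succ, if_neg h1, if_pos h2]
    rw [hu]
    constructor
    · exact segRepr_congr'
        (fun i hi1 hi2 => (if_pos (by omega : lo ≤ i ∧ i ≤ hi)).symm)
        (segRepr_apply hn hse v h)
    · intro m hm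
      have h3 : m ≠ node := fun he => hm (he ▸ Desc.refl node)
      exact ⟨by rw [apply_fst, if_neg h3], by rw [apply_snd, if_neg h3]⟩
  -- partial overlap: push down and recurse
  have hse' : s < e := by omega
  obtain ⟨hm1, hm2⟩ := mid_facts hse'
  set mid := PySem.Int.floordiv (s + e) 2 with hmid
  obtain ⟨hPr, hP0, hPout⟩ := segRepr_push hn hse' h
  set p := pvPush t l node s e with hp
  have hu : pvUpdateGo (fuel + 1) t l node s e lo hi v =
      (let p1 := pvUpdateGo fuel p.1 p.2 (2 * node) s mid lo hi v
       let p2 := pvUpdateGo fuel p1.1 p1.2 (2 * node + 1) (mid + 1) e lo hi v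
       (fun m => if m = node then p2.1 (2 * node) + p2.1 (2 * node + 1) else p2.1 m, p2.2)) := by
    rw [pvUpdateGo_succ, if_neg h1, if_neg h2]
  have hPr' := hPr
  rw [SegRepr] at hPr'
  obtain ⟨hLp, hRp⟩ := hPr'.2 hse'
  rw [hP0, fun_sub_zero] at hLp hRp
  set p1 := pvUpdateGo fuel p.1 p.2 (2 * node) s mid lo hi v with hp1
  obtain ⟨hU1, hO1⟩ := ih (by omega) (by omega) (by omega) hLp
  rw [← hp1] at hU1 hO1
  have hRp' : SegRepr p1.1 p1.2 (2 * node + 1) (mid + 1) e f :=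
    segRepr_frame'
      (fun m hm => (hO1 m (fun hD => desc_disjoint hn hD hm)).1)
      (fun m hm => (hO1 m (fun hD => desc_disjoint hn hD hm)).2) hRp
  set p2 := pvUpdateGo fuel p1.1 p1.2 (2 * node + 1) (mid + 1) e lo hi v with hp2
  obtain ⟨hU2, hO2⟩ := ih (by omega) (by omega) (by omega) hRp'
  rw [← hp2] at hU2 hO2
  have hU1' : SegRepr p2.1 p2.2 (2 * node) s mid
      (fun i => if lo ≤ i ∧ i ≤ hi then f i + v else f i) :=
    segRepr_frame'
      (fun m hm => (hO2 m (fun hD => desc_disjoint hn hm hD)).1)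
      (fun m hm => (hO2 m (fun hD => desc_disjoint hn hm hD)).2) hU1
  have hfst : (pvUpdateGo (fuel + 1) t l node s e lo hi v).1 =
      fun m => if m = node then p2.1 (2 * node) + p2.1 (2 * node + 1) else p2.1 m := by
    rw [hu]
  have hsnd : (pvUpdateGo (fuel + 1) t l node s e lo hi v).2 = p2.2 := by rw [hu]
  have hite : ∀ X Y : Int, (if (node : Int) = node then X else Y) = X :=
    fun X Y => if_pos rfl
  have hl'n : p2.2 node = 0 := by
    rw [(hO2 node (not_desc_right_self hn)).2, (hO1 node (not_desc_left_self hn)).2, hP0]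
  have hU1h := hU1'
  have hU2h := hU2
  rw [SegRepr] at hU1h hU2h
  constructor
  · rw [hfst, hsnd, SegRepr]
    constructor
    · rw [hite, hU1h.1, hU2h.1,
        ← isum_split (fun i => if lo ≤ i ∧ i ≤ hi then f i + v else f i)
          (show s - 1 ≤ mid by omega) (show mid ≤ e by omega)]
    · intro _
      rw [← hmid, hl'n, fun_sub_zero]
      constructor
      · exact segRepr_frame'
          (fun m hm => by simp only [if_neg (desc_left_ne_node hn hm)])
          (fun m hm => rfl) hU1'
      · exact segRepr_frame'
          (fun m hm => by simp only [if_neg (desc_right_ne_node hn hm)])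
          (fun m hm => rfl) hU2
  · intro m hm
    have h3 : m ≠ node := fun he => hm (he ▸ Desc.refl node)
    have h4 : ¬ Desc (2 * node) m := fun hD => hm (desc_left_of node m hD)
    have h5 : ¬ Desc (2 * node + 1) m := fun hD => hm (desc_right_of node m hD)
    constructor
    · rw [hfst]
      show (if m = node then p2.1 (2 * node) + p2.1 (2 * node + 1) else p2.1 m) = t m
      rw [if_neg h3, (hO2 m h5).1, (hO1 m h4).1, (hPout m hm).1]
    · rw [hsnd, (hO2 m h5).2, (hO1 m h4).2, (hPout m hm).2]

theorem segRepr_update {t l : Int → Int} {node s e lo hi v : Int} {f : Int → Int}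
    (hn : 1 ≤ node) (hse : s ≤ e) (h : SegRepr t l node s e f) :
    SegRepr (pvUpdate t l node s e lo hi v).1 (pvUpdate t l node s e lo hi v).2 node s e
      (fun i => if lo ≤ i ∧ i ≤ hi then f i + v else f i) ∧
    (∀ m, ¬ Desc node m →
      (pvUpdate t l node s e lo hi v).1 m = t m ∧
      (pvUpdate t l node s e lo hi v).2 m = l m) := by
  unfold pvUpdate
  exact segRepr_updateGo ((e - s).toNat + 1) (by omega) hn hse h
theorem isum_clamp_split (f : Int → Int) {s mid e : Int} (lo hi : Int)
    (hm1 : s ≤ mid) (hm2 : mid < e) :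
    isum f (max s lo) (min mid hi) + isum f (max (mid + 1) lo) (min e hi) =
    isum f (max s lo) (min e hi) := by
  by_cases hA : hi ≤ mid
  · rw [isum_empty f (show min e hi < max (mid + 1) lo by omega),
      show min mid hi = min e hi by omega]
    ring
  by_cases hB : mid < lo
  · rw [isum_empty f (show min mid hi < max s lo by omega),
      show max (mid + 1) lo = max s lo by omega]
    ring
  rw [show min mid hi = mid by omega, show max (mid + 1) lo = mid + 1 by omega,
    ← isum_split f (show max s lo - 1 ≤ mid by omega) (show mid ≤ min e hi by omega)]

theorem segRepr_queryGo : ∀ (fuel : Nat) {t l : Int → Int} {node s e lo hi : Int} {f : Int → Int},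
    (e - s).toNat < fuel → 1 ≤ node → SegRepr t l node s e f →
    (pvQueryGo fuel t l node s e lo hi).1 = isum f (max s lo) (min e hi) ∧
    SegRepr (pvQueryGo fuel t l node s e lo hi).2.1 (pvQueryGo fuel t l node s e lo hi).2.2 node s e f ∧
    (∀ m, ¬ Desc node m →
      (pvQueryGo fuel t l node s e lo hi).2.1 m = t m ∧
      (pvQueryGo fuel t l node s e lo hi).2.2 m = l m) := by
  intro fuel
  induction fuel with
  | zero => intro t l node s e lo hi f hd; exact absurd hd (by omega)
  | succ fuel ih =>
  intro t l node s e lo hi f hd hn h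
  by_cases h1 : hi < s ∨ e < lo
  · have hu : pvQueryGo (fuel + 1) t l node s e lo hi = (0, t, l) := by rw [pvQueryGo_succ, if_pos h1]
    rw [hu]
    exact ⟨(isum_empty f (by omega)).symm, h, fun m _ => ⟨rfl, rfl⟩⟩
  by_cases h2 : lo ≤ s ∧ e ≤ hi
  · have hu : pvQueryGo (fuel + 1) t l node s e lo hi = (t node, t, l) := by
      rw [pvQueryGo_succ, if_neg h1, if_pos h2]
    rw [hu]
    refine ⟨?_, h, fun m _ => ⟨rfl, rfl⟩⟩
    have h' := h
    rw [SegRepr] at h'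
    rw [h'.1, show max s lo = s by omega, show min e hi = e by omega]
  have hse' : s < e := by omega
  obtain ⟨hm1, hm2⟩ := mid_facts hse'
  set mid := PySem.Int.floordiv (s + e) 2 with hmid
  obtain ⟨hPr, hP0, hPout⟩ := segRepr_push hn hse' h
  set p := pvPush t l node s e with hp
  have hu : pvQueryGo (fuel + 1) t l node s e lo hi =
      (let q1 := pvQueryGo fuel p.1 p.2 (2 * node) s mid lo hi
       let q2 := pvQueryGo fuel q1.2.1 q1.2.2 (2 * node + 1) (mid + 1) e lo hi
       (q1.1 + q2.1, q2.2)) := by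
    rw [pvQueryGo_succ, if_neg h1, if_neg h2]
  have hPr' := hPr
  rw [SegRepr] at hPr'
  obtain ⟨hLp, hRp⟩ := hPr'.2 hse'
  rw [hP0, fun_sub_zero] at hLp hRp
  set q1 := pvQueryGo fuel p.1 p.2 (2 * node) s mid lo hi with hq1
  obtain ⟨hV1, hQ1, hO1⟩ := ih (by omega) (by omega) hLp
  rw [← hq1] at hV1 hQ1 hO1
  have hRp' : SegRepr q1.2.1 q1.2.2 (2 * node + 1) (mid + 1) e f :=
    segRepr_frame'
      (fun m hm => (hO1 m (fun hD => desc_disjoint hn hD hm)).1)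
      (fun m hm => (hO1 m (fun hD => desc_disjoint hn hD hm)).2) hRp
  set q2 := pvQueryGo fuel q1.2.1 q1.2.2 (2 * node + 1) (mid + 1) e lo hi with hq2
  obtain ⟨hV2, hQ2, hO2⟩ := ih (by omega) (by omega) hRp'
  rw [← hq2] at hV2 hQ2 hO2
  have hQ1' : SegRepr q2.2.1 q2.2.2 (2 * node) s mid f :=
    segRepr_frame'
      (fun m hm => (hO2 m (fun hD => desc_disjoint hn hm hD)).1)
      (fun m hm => (hO2 m (fun hD => desc_disjoint hn hm hD)).2) hQ1
  have hfst : (pvQueryGo (fuel + 1) t l node s e lo hi).1 = q1.1 + q2.1 := by rw [hu]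
  have hst1 : (pvQueryGo (fuel + 1) t l node s e lo hi).2.1 = q2.2.1 := by rw [hu]
  have hst2 : (pvQueryGo (fuel + 1) t l node s e lo hi).2.2 = q2.2.2 := by rw [hu]
  have hl'n : q2.2.2 node = 0 := by
    rw [(hO2 node (not_desc_right_self hn)).2, (hO1 node (not_desc_left_self hn)).2, hP0]
  have htn : q2.2.1 node = isum f s e := by
    rw [(hO2 node (not_desc_right_self hn)).1, (hO1 node (not_desc_left_self hn)).1]
    exact hPr'.1
  refine ⟨?_, ?_, ?_⟩
  · rw [hfst, hV1, hV2, isum_clamp_split f lo hi hm1 hm2]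
  · rw [hst1, hst2, SegRepr]
    refine ⟨htn, fun _ => ?_⟩
    rw [← hmid, hl'n, fun_sub_zero]
    exact ⟨hQ1', hQ2⟩
  · intro m hm
    have h4 : ¬ Desc (2 * node) m := fun hD => hm (desc_left_of node m hD)
    have h5 : ¬ Desc (2 * node + 1) m := fun hD => hm (desc_right_of node m hD)
    rw [hst1, hst2]
    exact ⟨by rw [(hO2 m h5).1, (hO1 m h4).1, (hPout m hm).1],
           by rw [(hO2 m h5).2, (hO1 m h4).2, (hPout m hm).2]⟩

theorem segRepr_query {t l : Int → Int} {node s e lo hi : Int} {f : Int → Int}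
    (hn : 1 ≤ node) (h : SegRepr t l node s e f) :
    (pvQuery t l node s e lo hi).1 = isum f (max s lo) (min e hi) ∧
    SegRepr (pvQuery t l node s e lo hi).2.1 (pvQuery t l node s e lo hi).2.2 node s e f ∧
    (∀ m, ¬ Desc node m →
      (pvQuery t l node s e lo hi).2.1 m = t m ∧
      (pvQuery t l node s e lo hi).2.2 m = l m) := by
  unfold pvQuery
  exact segRepr_queryGo ((e - s).toNat + 1) (by omega) hn h
theorem segRepr_buildGo : ∀ (fuel : Nat) (arr : List Int) {t l : Int → Int} {node s e : Int},
    (e - s).toNat < fuel → 1 ≤ node → s ≤ e → (∀ m, l m = 0) →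
    SegRepr (pvBuildGo arr fuel t node s e) l node s e (fun i => PySem.List.pyGetD arr i 0) ∧
    (∀ m, ¬ Desc node m → pvBuildGo arr fuel t node s e m = t m) := by
  intro fuel
  induction fuel with
  | zero => intro arr t l node s e hd; exact absurd hd (by omega)
  | succ fuel ih =>
  intro arr t l node s e hd hn hse hl0
  by_cases hb : s = e
  · have hu : pvBuildGo arr (fuel + 1) t node s e =
        fun m => if m = node then PySem.List.pyGetD arr s 0 else t m := by
      rw [pvBuildGo_succ, if_pos (Or.inl hb)]
    rw [hu]
    constructor
    · rw [SegRepr]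
      refine ⟨?_, fun hlt => absurd hlt (by omega)⟩
      subst hb
      rw [if_pos rfl, isum_singleton]
    · intro m hm
      have h3 : m ≠ node := fun he => hm (he ▸ Desc.refl node)
      exact if_neg h3
  have hse' : s < e := by omega
  obtain ⟨hm1, hm2⟩ := mid_facts hse'
  set mid := PySem.Int.floordiv (s + e) 2 with hmid
  have hu : pvBuildGo arr (fuel + 1) t node s e =
      (let t1 := pvBuildGo arr fuel t (2 * node) s mid
       let t2 := pvBuildGo arr fuel t1 (2 * node + 1) (mid + 1) e
       fun m => if m = node then t2 (2 * node) + t2 (2 * node + 1) else t2 m) := by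
    rw [pvBuildGo_succ, if_neg (by omega : ¬(s = e ∨ e < s))]
  set t1 := pvBuildGo arr fuel t (2 * node) s mid with ht1
  obtain ⟨hB1, hO1⟩ := ih arr (t := t) (node := 2 * node)
    (s := s) (e := mid) (by omega) (by omega) (by omega) hl0
  rw [← ht1] at hB1 hO1
  set t2 := pvBuildGo arr fuel t1 (2 * node + 1) (mid + 1) e with ht2
  obtain ⟨hB2, hO2⟩ := ih arr (t := t1) (node := 2 * node + 1)
    (s := mid + 1) (e := e) (by omega) (by omega) (by omega) hl0
  rw [← ht2] at hB2 hO2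
  have hB1' : SegRepr t2 l (2 * node) s mid (fun i => PySem.List.pyGetD arr i 0) :=
    segRepr_frame'
      (fun m hm => hO2 m (fun hD => desc_disjoint hn hm hD))
      (fun m hm => rfl) hB1
  have hfin : pvBuildGo arr (fuel + 1) t node s e =
      fun m => if m = node then t2 (2 * node) + t2 (2 * node + 1) else t2 m := by rw [hu]
  rw [hfin]
  have hB1h := hB1'
  have hB2h := hB2
  rw [SegRepr] at hB1h hB2h
  constructor
  · rw [SegRepr]
    have hite : ∀ X Y : Int, (if (node : Int) = node then X else Y) = X :=
      fun X Y => if_pos rfl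
    refine ⟨?_, fun _ => ?_⟩
    · rw [hite, hB1h.1, hB2h.1, ← isum_split (fun i => PySem.List.pyGetD arr i 0)
        (show s - 1 ≤ mid by omega) (show mid ≤ e by omega)]
    · rw [← hmid, hl0 node, fun_sub_zero]
      constructor
      · exact segRepr_frame'
          (fun m hm => by simp only [if_neg (desc_left_ne_node hn hm)])
          (fun m hm => rfl) hB1'
      · exact segRepr_frame'
          (fun m hm => by simp only [if_neg (desc_right_ne_node hn hm)])
          (fun m hm => rfl) hB2
  · intro m hm
    have h3 : m ≠ node := fun he => hm (he ▸ Desc.refl node)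
    have h4 : ¬ Desc (2 * node) m := fun hD => hm (desc_left_of node m hD)
    have h5 : ¬ Desc (2 * node + 1) m := fun hD => hm (desc_right_of node m hD)
    show (if m = node then t2 (2 * node) + t2 (2 * node + 1) else t2 m) = t m
    rw [if_neg h3, hO2 m h5, hO1 m h4]

theorem segRepr_build (arr : List Int) {t l : Int → Int} {node s e : Int}
    (hn : 1 ≤ node) (hse : s ≤ e) (hl0 : ∀ m, l m = 0) :
    SegRepr (pvBuild arr t node s e) l node s e (fun i => PySem.List.pyGetD arr i 0) ∧
    (∀ m, ¬ Desc node m → pvBuild arr t node s e m = t m) := by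
  unfold pvBuild
  exact segRepr_buildGo ((e - s).toNat + 1) arr (by omega) hn hse hl0
theorem getElem?_enumerate (a : List Int) : ∀ (st : Int) (j : Nat),
    (PySem.List.enumerate a st)[j]? = a[j]?.map (fun x => (st + (j : Int), x)) := by
  induction a with
  | nil => intro st j; simp [PySem.List.enumerate_nil]
  | cons x xs ih =>
    intro st j
    rw [PySem.List.enumerate_cons]
    cases j with
    | zero => simp
    | succ j =>
      simp only [List.getElem?_cons_succ, ih (st + 1) j]
      cases h : xs[j]? with
      | none => rfl
      | some y => simp; omega

theorem upd_length (a : List Int) (lo hi v : Int) :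
    ((PySem.List.enumerate a 0).map
      (fun p => if lo ≤ p.1 ∧ p.1 ≤ hi then p.2 + v else p.2)).length = a.length := by
  rw [List.length_map, PySem.List.length_enumerate]

theorem upd_getD (a : List Int) (lo hi v : Int) {i : Int} (h0 : 0 ≤ i)
    (h1 : i < (a.length : Int)) :
    PySem.List.pyGetD ((PySem.List.enumerate a 0).map
      (fun p => if lo ≤ p.1 ∧ p.1 ≤ hi then p.2 + v else p.2)) i 0 =
    if lo ≤ i ∧ i ≤ hi then PySem.List.pyGetD a i 0 + v else PySem.List.pyGetD a i 0 := by
  have hlen : ((PySem.List.enumerate a 0).map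
      (fun p => if lo ≤ p.1 ∧ p.1 ≤ hi then p.2 + v else p.2)).length = a.length :=
    upd_length a lo hi v
  have hj : i.toNat < a.length := by omega
  rw [PySem.List.pyGetD_eq_getElem (xs := (PySem.List.enumerate a 0).map
        (fun p => if lo ≤ p.1 ∧ p.1 ≤ hi then p.2 + v else p.2)) (d := 0) h0
      (by rw [hlen]; exact h1),
    PySem.List.pyGetD_eq_getElem (xs := a) (d := 0) h0 h1]
  have hget : ((PySem.List.enumerate a 0).map
      (fun p => if lo ≤ p.1 ∧ p.1 ≤ hi then p.2 + v else p.2))[i.toNat]? =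
      some (if lo ≤ i ∧ i ≤ hi then a[i.toNat] + v else a[i.toNat]) := by
    rw [List.getElem?_map, getElem?_enumerate a 0 i.toNat, List.getElem?_eq_getElem hj]
    simp only [Option.map_some]
    have hcast : (0 : Int) + (i.toNat : Int) = i := by omega
    rw [hcast]
  rw [List.getElem?_eq_getElem (by omega)] at hget
  exact Option.some.inj hget

theorem loop_inv : ∀ (ops : List (List Int)) (N : Int) (t l : Int → Int) (a res : List Int),
    1 ≤ N → (a.length : Int) = N →
    SegRepr t l 1 0 (N - 1) (fun i => PySem.List.pyGetD a i 0) →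
    (ops.foldl (pvStepA N) ((t, l), res)).2 = (ops.foldl (pvStepB (N - 1)) (a, res)).2 := by
  intro ops
  induction ops with
  | nil => intros; rfl
  | cons op ops ih =>
    intro N t l a res hN hlen hrep
    simp only [List.foldl_cons]
    set lo := PySem.List.pyGetD op 1 0 with hlo
    set hi := PySem.List.pyGetD op 2 0 with hhi
    by_cases hop : PySem.List.pyGetD op 0 0 = 1
    · set v := PySem.List.pyGetD op 3 0 with hv
      have hA : pvStepA N ((t, l), res) op =
          (pvUpdate t l 1 0 (N - 1) lo hi v, res) := by
        rw [pvStepA, if_pos hop]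
      have hB : pvStepB (N - 1) (a, res) op =
          ((PySem.List.enumerate a 0).map
            (fun p => if max lo 0 ≤ p.1 ∧ p.1 ≤ min hi (N - 1) then p.2 + v else p.2),
           res) := by
        rw [pvStepB]; simp only [if_pos hop]; rfl
      rw [hA, hB]
      obtain ⟨hU, _⟩ := segRepr_update (t := t) (l := l) (node := 1)
        (s := 0) (e := N - 1) (lo := lo) (hi := hi) (v := v) (by norm_num) (by omega) hrep
      have hrep' : SegRepr (pvUpdate t l 1 0 (N - 1) lo hi v).1
          (pvUpdate t l 1 0 (N - 1) lo hi v).2 1 0 (N - 1)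
          (fun i => PySem.List.pyGetD ((PySem.List.enumerate a 0).map
            (fun p => if max lo 0 ≤ p.1 ∧ p.1 ≤ min hi (N - 1) then p.2 + v else p.2)) i 0) := by
        refine segRepr_congr' (fun i h0 h1 => ?_) hU
        rw [upd_getD a (max lo 0) (min hi (N - 1)) v h0 (by omega)]
        by_cases hc : lo ≤ i ∧ i ≤ hi
        · rw [if_pos hc, if_pos (by omega)]
        · rw [if_neg hc, if_neg (by omega)]
      exact ih N _ _ _ res hN (by rw [upd_length]; exact hlen) hrep'
    · have hq := segRepr_query (t := t) (l := l) (node := 1)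
        (s := 0) (e := N - 1) (lo := lo) (hi := hi) (by norm_num) hrep
      have hA : pvStepA N ((t, l), res) op =
          ((pvQuery t l 1 0 (N - 1) lo hi).2, res ++ [(pvQuery t l 1 0 (N - 1) lo hi).1]) := by
        rw [pvStepA, if_neg hop]
      have hB : pvStepB (N - 1) (a, res) op =
          (a, res ++ [isum (fun i => PySem.List.pyGetD a i 0) (max lo 0) (min hi (N - 1))]) := by
        rw [pvStepB]; simp only [if_neg hop]; rfl
      rw [hA, hB]
      have hval : (pvQuery t l 1 0 (N - 1) lo hi).1 =
          isum (fun i => PySem.List.pyGetD a i 0) (max lo 0) (min hi (N - 1)) := by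
        rw [hq.1, show max 0 lo = max lo 0 by omega, show min (N - 1) hi = min hi (N - 1) by omega]
      rw [hval]
      exact ih N _ _ a _ hN hlen hq.2.1

theorem segment_tree_lazy_spec : Claim_equal_segment_tree_lazy := by
  unfold Claim_equal_segment_tree_lazy
  intro n arr operations _ hPre
  unfold Spec_segment_tree_lazy segment_tree_lazy segment_tree_lazy_alt
  have hN : 1 ≤ (arr.length : Int) := by
    cases arr with
    | nil => exact absurd rfl hPre.1
    | cons x xs => simp
  obtain ⟨hB, _⟩ := segRepr_build arr
    (t := fun _ => 0) (l := fun _ => 0) (node := 1) (s := 0) (e := (arr.length : Int) - 1)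
    (by norm_num) (by omega) (fun _ => rfl)
  exact loop_inv operations (arr.length : Int) _ _ arr [] hN rfl hB
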